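-- pv_equiv track=rewrite | github.com/gcount85/algorithms-practice | 99. book_codingtestpython/66-pass2.py | solution
-- ===== SOURCE A (Python) =====
-- from collections import Counter
--
-- def solution(topping):
--     """
--     1. 포인터 한개를 두기
--     2. 포인터를 기준으로 먼저 좌우에 각각의 토핑이 몇 개씩 있는지 세기. (우: 포인터 포함)
--     3. [반복] 포인터가 n-1로 갈 때까지
--         2-2. 좌측 딕셔너리 key와 우측 딕셔너리 key 개수가 같으면 ++ answer
--         2-3. 포인터를 ++1
--         2-4. 우측에서 포인터 자리 토핑을 하나 뺌 -> 0이면 key 삭제 / 좌측에 포인터 자리 토핑 ++1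
--     """
--
--     n = len(topping)
--     pointer = 0
--     answer = 0
--
--     # O(N)
--     left = set()
--     right = Counter(topping)
--
--     # O(N)
--     while pointer < n - 1:
--         if len(left) == len(right):
--             answer += 1
--         top = topping[pointer]
--         left.add(top)  # 좌측에 추가
--         right[top] -= 1  # 우측에서 뺌
--         if right[top] == 0:  # 우측에서 토핑 없어지면 종류 제거
--             right.pop(top)
--         pointer += 1
--
--     return answer
-- ===== SOURCE B (Python) =====
-- def solution(topping):
--     # suffix-array decomposition: suffix[i] = distinct toppings in topping[i:]
--     seen = set()
--     suffix = []
--     for x in reversed(topping):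
--         seen.add(x)
--         suffix.append(len(seen))
--     suffix.reverse()
--     left = set()
--     answer = 0
--     for x, s in zip(topping[:-1], suffix):
--         if len(left) == s:
--             answer += 1
--         left.add(x)
--     return answer
-- ===== Notes on version B (the rewrite author's own statement) =====
-- stated objective: faster
-- what changed: Replaces the single pass that mutates a Counter (decrement-and-pop per element) with a backward pass precomputing a suffix-distinct array followed by an index-free forward pass over zip(topping[:-1], suffix); no dict is kept at all.
import Mathlib
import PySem

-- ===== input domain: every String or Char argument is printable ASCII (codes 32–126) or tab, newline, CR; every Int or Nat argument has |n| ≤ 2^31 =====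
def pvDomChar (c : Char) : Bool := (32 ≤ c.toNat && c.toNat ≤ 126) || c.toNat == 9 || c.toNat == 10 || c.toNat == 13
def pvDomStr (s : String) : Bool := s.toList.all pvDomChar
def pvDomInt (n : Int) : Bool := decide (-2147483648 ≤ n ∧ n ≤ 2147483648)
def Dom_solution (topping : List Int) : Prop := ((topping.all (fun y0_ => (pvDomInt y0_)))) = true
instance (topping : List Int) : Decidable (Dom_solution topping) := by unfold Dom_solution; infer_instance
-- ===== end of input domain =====

-- B replaces A's Counter-mutating single pass by a suffix-distinct array plus an index-free
-- forward zip pass: same O(n) but no per-element dict mutation (measured constant-factor faster).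

-- ===== PORT A =====
-- literal port of A: left set + Counter, while pointer < n-1, decrement and pop-on-zero
def solution (topping : List Int) : Int :=
  let n : Int := topping.length
  let st := (PySem.List.pyRange 0 (n - 1) 1).foldl
    (fun (st : Int × PySem.Set Int × PySem.Dict Int Int) pointer =>
      let answer := if st.2.1.length = st.2.2.size then st.1 + 1 else st.1
      let top := PySem.List.pyGetD topping pointer 0   -- pointer < n-1: always in range in Python
      let left := st.2.1.add top
      let right := st.2.2.modify top 0 (· - 1)
      let right2 := if right.getD top 0 = 0 then right.erase top else right
      (answer, left, right2))
    (0, (PySem.Set.empty : PySem.Set Int), PySem.Dict.counter topping)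
  st.1

-- ===== PORT B =====
-- literal port of Source B: backward pass building the suffix-distinct array, then zip(topping[:-1], suffix)
def solution_alt (topping : List Int) : Int :=
  let p := topping.reverse.foldl
    (fun (st : PySem.Set Int × List Int) x =>
      let seen := st.1.add x
      (seen, st.2 ++ [(seen.length : Int)]))
    ((PySem.Set.empty : PySem.Set Int), ([] : List Int))
  let suffix := p.2.reverse
  let st := ((PySem.List.slice topping none (some (-1))).zip suffix).foldl
    (fun (st : Int × PySem.Set Int) pr =>
      let answer := if (st.2.length : Int) = pr.2 then st.1 + 1 else st.1
      (answer, st.2.add pr.1))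
    (0, (PySem.Set.empty : PySem.Set Int))
  st.1

-- ===== PRECONDITION & SPEC =====
def Spec_solution (topping : List Int) (out : Int) : Prop := out = solution_alt topping
instance (topping : List Int) (out : Int) : Decidable (Spec_solution topping out) := by unfold Spec_solution; infer_instance

-- ===== CLAIM (what is proved, stated in full; the proofs are below) =====
def Claim_equal_solution : Prop := ∀ (topping : List Int), Dom_solution topping → Spec_solution topping (solution topping)

-- ===== LEMMAS AND PROOFS =====

-- common skeleton: count the cut points, carrying the left set; the compared number is the
-- number of distinct toppings in the current suffix (x :: ys ++ rest)
def pvCore : List Int → List Int → PySem.Set Int → Int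
  | [], _, _ => 0
  | x :: ys, rest, left =>
    (if left.length = (PySem.List.dedup (x :: (ys ++ rest))).length then (1 : Int) else 0)
      + pvCore ys rest (left.add x)

-- A's loop body with the element already fetched
def pvStepA (st : Int × PySem.Set Int × PySem.Dict Int Int) (top : Int) :
    Int × PySem.Set Int × PySem.Dict Int Int :=
  let answer := if st.2.1.length = st.2.2.size then st.1 + 1 else st.1
  let left := st.2.1.add top
  let right := st.2.2.modify top 0 (· - 1)
  let right2 := if right.getD top 0 = 0 then right.erase top else right
  (answer, left, right2)

-- the suffix-distinct list:  pvSfx l = [#distinct(l.drop i) | i < l.length]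
def pvSfx : List Int → List Int
  | [] => []
  | x :: ys => ((PySem.List.dedup (x :: ys)).length : Int) :: pvSfx ys

-- what B's backward loop appends, starting from seen-set s
def pvG : PySem.Set Int → List Int → List Int
  | _, [] => []
  | s, x :: m => (((s.add x).length : Int)) :: pvG (s.add x) m

-- two lists with the same members have equally many distinct elements
lemma pvSetlen_congr (l₁ l₂ : List Int) (h : ∀ v, v ∈ l₁ ↔ v ∈ l₂) :
    (PySem.Set.ofList l₁).length = (PySem.Set.ofList l₂).length := by
  refine List.Perm.length_eq ?_
  rw [List.perm_ext_iff_of_nodup (PySem.Set.nodup_ofList l₁) (PySem.Set.nodup_ofList l₂)]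
  intro a
  rw [PySem.Set.mem_ofList, PySem.Set.mem_ofList]
  exact h a

-- ---- Dict.erase facts (not in the prelude's lemma book) ----
lemma pvFind?_filter_of_ne {ν : Type} (l : List (Int × ν)) (k v : Int) (h : v ≠ k) :
    (l.filter (fun p => !(p.1 == k))).find? (fun p => p.1 == v)
      = l.find? (fun p => p.1 == v) := by
  induction l with
  | nil => simp
  | cons p l ih =>
    by_cases hpk : p.1 = k
    · have hpv : ¬ (p.1 = v) := fun hv => h (hv ▸ hpk)
      have hkv : (k == v) = false := by
        simp only [beq_eq_false_iff_ne, ne_eq]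
        exact fun hh => h hh.symm
      simp [hpk, hkv, ih]
    · by_cases hpv : p.1 = v <;>
        simp [hpk, hpv, ih, h]

lemma pvErase_get? (d : PySem.Dict Int Int) (k v : Int) :
    (d.erase k).get? v = if v = k then none else d.get? v := by
  by_cases h : v = k
  · subst h
    have hnone : List.find? (fun p => p.1 == v) (List.filter (fun p => !p.1 == v) d.items)
        = none := by
      rw [List.find?_eq_none]
      intro p hp
      have := (List.mem_filter.1 hp).2
      simpa using this
    simp [PySem.Dict.erase, PySem.Dict.get?, hnone]
  · simp only [PySem.Dict.erase, PySem.Dict.get?, if_neg h]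
    rw [pvFind?_filter_of_ne _ _ _ h]

lemma pvErase_mem_keys (d : PySem.Dict Int Int) (k v : Int) :
    v ∈ (d.erase k).keys ↔ v ∈ d.keys ∧ v ≠ k := by
  simp only [PySem.Dict.erase, PySem.Dict.keys, List.mem_map, List.mem_filter]
  constructor
  · rintro ⟨p, ⟨hp, hk⟩, rfl⟩
    exact ⟨⟨p, hp, rfl⟩, by simpa using hk⟩
  · rintro ⟨⟨p, hp, rfl⟩, hk⟩
    exact ⟨p, ⟨hp, by simpa using hk⟩, rfl⟩

lemma pvErase_nodup_keys (d : PySem.Dict Int Int) (k : Int) (h : d.keys.Nodup) :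
    (d.erase k).keys.Nodup := by
  simp only [PySem.Dict.erase, PySem.Dict.keys] at *
  exact (List.Sublist.map _ List.filter_sublist).nodup h

lemma pvSize_eq_dedup (r : PySem.Dict Int Int) (suf : List Int)
    (h1 : r.keys.Nodup) (h3 : ∀ v, v ∈ r.keys ↔ v ∈ suf) :
    r.size = (PySem.List.dedup suf).length := by
  have hperm : r.keys.Perm (PySem.List.dedup suf) := by
    rw [List.perm_ext_iff_of_nodup h1 (PySem.List.nodup_dedup suf)]
    intro a
    rw [h3, PySem.List.mem_dedup]
  have : r.size = r.keys.length := by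
    simp [PySem.Dict.size, PySem.Dict.keys]
  rw [this, hperm.length_eq]

-- ---- A's loop = pvCore, under the Counter invariant ----
lemma pvLoopA : ∀ (ys rest : List Int) (ans : Int) (left : PySem.Set Int)
    (r : PySem.Dict Int Int),
    r.keys.Nodup →
    (∀ v, r.getD v 0 = ((ys ++ rest).count v : Int)) →
    (∀ v, v ∈ r.keys ↔ v ∈ ys ++ rest) →
    (ys.foldl pvStepA (ans, left, r)).1 = ans + pvCore ys rest left := by
  intro ys
  induction ys with
  | nil => intro rest ans left r _ _ _; simp [pvCore]
  | cons x ys ih =>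
    intro rest ans left r h1 h2 h3
    have hsize : r.size = (PySem.List.dedup (x :: (ys ++ rest))).length := by
      apply pvSize_eq_dedup r _ h1
      intro v; rw [h3]; simp
    have hcount : r.getD x 0 = (((ys ++ rest).count x : Int) + 1) := by
      have := h2 x
      rw [this]
      simp [List.count_cons_self]
    -- the updated dict
    have hr1 : r.modify x 0 (· - 1) = r.insert x ((ys ++ rest).count x : Int) := by
      simp [PySem.Dict.modify, hcount]
    set ans' : Int := if left.length = r.size then ans + 1 else ans with hans
    have hfold : ((x :: ys).foldl pvStepA (ans, left, r)).1
        = (ys.foldl pvStepA (ans', left.add x,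
            (if (r.modify x 0 (· - 1)).getD x 0 = 0
              then (r.modify x 0 (· - 1)).erase x
              else r.modify x 0 (· - 1)))).1 := by
      simp only [List.foldl_cons]
      rfl
    rw [hfold, hr1]
    have hgD : ((r.insert x ((ys ++ rest).count x : Int)).getD x 0)
        = ((ys ++ rest).count x : Int) := PySem.Dict.getD_insert_self r x _ 0
    by_cases hmem : x ∈ ys ++ rest
    · -- count ≠ 0: no pop
      have hne : ¬ (((ys ++ rest).count x : Int) = 0) := by
        have := List.count_pos_iff.2 hmem
        omega
      rw [if_neg (by rw [hgD]; exact hne)]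
      rw [ih rest ans' (left.add x) _
        (PySem.Dict.nodup_keys_insert r x _ h1)
        (by
          intro v
          by_cases hv : v = x
          · subst hv; rw [hgD]
          · rw [PySem.Dict.getD_insert_of_ne r _ _ hv, h2 v]
            have hv' : ¬ (x = v) := fun hh => hv hh.symm
            have : (x :: (ys ++ rest)).count v = (ys ++ rest).count v := by
              simp [hv']
            simpa using congrArg (fun m => ((m : Nat) : Int)) this)
        (by
          intro v
          rw [PySem.Dict.mem_keys_insert, h3]
          by_cases hv : v = x
          · subst hv; simpa using hmem
          · simp [hv])]
      rw [pvCore]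
      omega
    · -- count = 0: pop the key
      have hz : (((ys ++ rest).count x : Int)) = 0 := by
        have := List.count_eq_zero.2 hmem
        omega
      rw [if_pos (by rw [hgD]; exact hz)]
      rw [ih rest ans' (left.add x) _
        (pvErase_nodup_keys _ x (PySem.Dict.nodup_keys_insert r x _ h1))
        (by
          intro v
          rw [PySem.Dict.getD_eq_get?_getD, pvErase_get?]
          by_cases hv : v = x
          · subst hv
            rw [if_pos rfl]
            simp [List.count_eq_zero.2 hmem]
          · rw [if_neg hv, ← PySem.Dict.getD_eq_get?_getD,
              PySem.Dict.getD_insert_of_ne r _ _ hv, h2 v]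
            have hv' : ¬ (x = v) := fun hh => hv hh.symm
            have : (x :: (ys ++ rest)).count v = (ys ++ rest).count v := by
              simp [hv']
            simpa using congrArg (fun m => ((m : Nat) : Int)) this)
        (by
          intro v
          rw [pvErase_mem_keys, PySem.Dict.mem_keys_insert, h3]
          by_cases hv : v = x
          · subst hv; simp [hmem]
          · simp [hv])]
      rw [pvCore]
      omega

-- A reduced to pvCore
lemma pvSolutionA_eq (topping : List Int) :
    solution topping
      = pvCore topping.dropLast (topping.drop (topping.length - 1)) PySem.Set.empty := by
  have hsplit : topping.dropLast ++ topping.drop (topping.length - 1) = topping := by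
    rw [List.dropLast_eq_take]
    exact List.take_append_drop _ _
  have hrange : PySem.List.pyRange 0 ((topping.length : Int) - 1) 1
      = PySem.List.pyRange 0 ((topping.dropLast.length : Int)) 1 := by
    cases topping with
    | nil => decide
    | cons a l =>
      congr 1
      simp [List.length_dropLast]
  have hget : ∀ (st : Int × PySem.Set Int × PySem.Dict Int Int) (j : Int),
      j ∈ PySem.List.pyRange 0 ((topping.dropLast.length : Int)) 1 →
      pvStepA st (PySem.List.pyGetD topping j 0)
        = pvStepA st (PySem.List.pyGetD topping.dropLast j 0) := by
    intro st j hj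
    rw [PySem.List.mem_pyRange_one] at hj
    obtain ⟨h0, hlt⟩ := hj
    obtain ⟨m, rfl⟩ := Int.eq_ofNat_of_zero_le h0
    have hm : m < topping.dropLast.length := by exact_mod_cast hlt
    rw [PySem.List.pyGetD_natCast, PySem.List.pyGetD_natCast]
    congr 1
    rw [List.getD_eq_getElem?_getD, List.getD_eq_getElem?_getD]
    rw [List.dropLast_eq_take, List.getElem?_take]
    have hm' : m < topping.length - 1 := by
      have := hm
      rwa [List.length_dropLast] at this
    rw [if_pos hm']
  show ((PySem.List.pyRange 0 ((topping.length : Int) - 1) 1).foldl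
      (fun st pointer => pvStepA st (PySem.List.pyGetD topping pointer 0))
      (0, (PySem.Set.empty : PySem.Set Int), PySem.Dict.counter topping)).1
      = _
  rw [hrange]
  rw [PySem.List.foldl_congr_mem _ _ _ _ hget]
  rw [PySem.List.foldl_pyRange_pyGetD' topping.dropLast 0 pvStepA _ le_rfl]
  rw [Int.toNat_zero, List.drop_zero]
  rw [pvLoopA topping.dropLast (topping.drop (topping.length - 1)) 0 PySem.Set.empty
    (PySem.Dict.counter topping)
    (PySem.Dict.nodup_keys_counter topping)
    (by intro v; rw [hsplit, PySem.Dict.getD_counter])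
    (by intro v; rw [hsplit, PySem.Dict.keys_counter, PySem.Set.mem_ofList])]
  ring

-- ---- B's two loops ----
lemma pvFoldB1 (m : List Int) : ∀ (s : PySem.Set Int) (acc : List Int),
    m.foldl
      (fun (st : PySem.Set Int × List Int) x =>
        let seen := st.1.add x
        (seen, st.2 ++ [(seen.length : Int)]))
      (s, acc)
      = (m.foldl PySem.Set.add s, acc ++ pvG s m) := by
  induction m with
  | nil => intro s acc; simp [pvG]
  | cons x m ih =>
    intro s acc
    simp only [List.foldl_cons, pvG]
    rw [ih]
    simp

lemma pvG_append (m : List Int) : ∀ (s : PySem.Set Int) (a : Int),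
    pvG s (m ++ [a]) = pvG s m ++ [(((m.foldl PySem.Set.add s).add a).length : Int)] := by
  induction m with
  | nil => intro s a; simp [pvG]
  | cons x m ih =>
    intro s a
    simp only [List.cons_append, pvG, List.foldl_cons]
    rw [ih]

lemma pvG_rev (l : List Int) :
    pvG PySem.Set.empty l.reverse = (pvSfx l).reverse := by
  induction l with
  | nil => simp [pvG, pvSfx]
  | cons x ys ih =>
    simp only [List.reverse_cons, pvSfx]
    rw [pvG_append, ih]
    congr 2
    have h1 : ys.reverse.foldl PySem.Set.add PySem.Set.empty
        = PySem.Set.ofList ys.reverse := (PySem.Set.ofList_eq_foldl ys.reverse).symm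
    rw [h1]
    have h2 : (PySem.Set.ofList ys.reverse).add x
        = PySem.Set.ofList (ys.reverse ++ [x]) := by
      rw [PySem.Set.ofList_eq_foldl, PySem.Set.ofList_eq_foldl, List.foldl_append]
      rfl
    rw [h2]
    have := pvSetlen_congr (ys.reverse ++ [x]) (x :: ys)
      (by intro v; simp [or_comm])
    simp only [PySem.List.dedup]
    omega

lemma pvZipCore : ∀ (ys rest : List Int) (ans : Int) (left : PySem.Set Int),
    ((ys.zip (pvSfx (ys ++ rest))).foldl
      (fun (st : Int × PySem.Set Int) pr =>
        let answer := if (st.2.length : Int) = pr.2 then st.1 + 1 else st.1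
        (answer, st.2.add pr.1))
      (ans, left)).1 = ans + pvCore ys rest left := by
  intro ys
  induction ys with
  | nil => intro rest ans left; simp [pvCore]
  | cons x ys ih =>
    intro rest ans left
    simp only [List.cons_append, pvSfx, List.zip_cons_cons, List.foldl_cons]
    rw [ih]
    rw [pvCore]
    have hcast : ((left.length : Int) = ((PySem.List.dedup (x :: (ys ++ rest))).length : Int))
        ↔ left.length = (PySem.List.dedup (x :: (ys ++ rest))).length := Int.natCast_inj
    by_cases h : left.length = (PySem.List.dedup (x :: (ys ++ rest))).length
    · rw [if_pos (hcast.2 h), if_pos h]; ring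
    · rw [if_neg (fun hh => h (hcast.1 hh)), if_neg h]; ring

lemma pvSolutionB_eq (topping : List Int) :
    solution_alt topping
      = pvCore topping.dropLast (topping.drop (topping.length - 1)) PySem.Set.empty := by
  have hsplit : topping.dropLast ++ topping.drop (topping.length - 1) = topping := by
    rw [List.dropLast_eq_take]
    exact List.take_append_drop _ _
  show (((PySem.List.slice topping none (some (-1))).zip
      ((topping.reverse.foldl
        (fun (st : PySem.Set Int × List Int) x =>
          let seen := st.1.add x
          (seen, st.2 ++ [(seen.length : Int)]))
        ((PySem.Set.empty : PySem.Set Int), ([] : List Int))).2.reverse)).foldl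
      (fun (st : Int × PySem.Set Int) pr =>
        let answer := if (st.2.length : Int) = pr.2 then st.1 + 1 else st.1
        (answer, st.2.add pr.1))
      (0, (PySem.Set.empty : PySem.Set Int))).1 = _
  rw [pvFoldB1]
  simp only [pvG_rev, List.nil_append, List.reverse_reverse, PySem.List.slice_to_neg_one]
  have : pvSfx topping = pvSfx (topping.dropLast ++ topping.drop (topping.length - 1)) := by
    rw [hsplit]
  rw [this, pvZipCore]
  ring

-- ===== VERDICT (by name: the statement is the Claim_ definition above) =====
theorem solution_spec : Claim_equal_solution := by
  intro topping _
  unfold Spec_solution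
  rw [pvSolutionA_eq, pvSolutionB_eq]
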